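-- pv_equiv track=rewrite | github.com/kwyxz/rom-manager | rom_manager.py | find_revision
-- ===== SOURCE A (Python) =====
-- def find_revision(game):
--     game.sort()
--     revisions = []
--     for rom in game:
--         # find revisions
--         if '(Rev' in rom:
--             revisions.append(rom)
--     if len(revisions)>0:
--         revisions.sort()
--         # use the latest revision
--         return revisions[-1]
--     return game[-1]
-- ===== SOURCE B (Python) =====
-- def find_revision(game):
--     game.sort()  # keep A's in-place sort (observable mutation)
--     for rom in reversed(game):
--         if '(Rev' in rom:
--             return rom
--     return game[-1]
-- ===== Notes on version B (the rewrite author's own statement) =====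
-- stated objective: simpler
-- what changed: Instead of building a revisions list and sorting it a second time, B scans the sorted list once in reverse and returns the first rom containing '(Rev' (correct because the revisions are a subsequence of the sorted list), falling back to game[-1].
import Mathlib
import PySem

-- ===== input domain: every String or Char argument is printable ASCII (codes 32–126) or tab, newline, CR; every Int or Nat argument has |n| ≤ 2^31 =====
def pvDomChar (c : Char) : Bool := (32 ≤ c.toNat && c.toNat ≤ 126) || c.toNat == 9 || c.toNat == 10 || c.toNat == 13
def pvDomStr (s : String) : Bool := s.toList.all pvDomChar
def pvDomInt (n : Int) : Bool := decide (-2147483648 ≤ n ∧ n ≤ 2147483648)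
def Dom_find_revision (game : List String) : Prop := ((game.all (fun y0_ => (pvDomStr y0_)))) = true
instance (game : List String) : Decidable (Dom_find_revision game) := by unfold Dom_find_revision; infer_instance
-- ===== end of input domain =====

-- B drops the second sort and the revisions list: it scans the sorted list once in reverse;
-- the equivalence is about the RETURN value (both Pythons sort `game` in place identically).

-- ===== PORT A =====
def find_revision (game : List String) : String :=
  let g := PySem.List.sorted game (fun x => x) false
  let revisions := g.foldl (fun acc rom =>
    if PySem.Str.isIn "(Rev" rom then acc ++ [rom] else acc) []
  if revisions.length > 0 then
    let r := PySem.List.sorted revisions (fun x => x) false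
    PySem.List.pyGetD r (-1) ""
  else
    PySem.List.pyGetD g (-1) ""

-- ===== PORT B =====
-- 'for rom in reversed(game): if "(Rev" in rom: return rom'
def findRevScan : List String → Option String
  | [] => none
  | r :: t => if PySem.Str.isIn "(Rev" r then some r else findRevScan t

def find_revision_alt (game : List String) : String :=
  let g := PySem.List.sorted game (fun x => x) false
  match findRevScan g.reverse with
  | some r => r
  | none => PySem.List.pyGetD g (-1) ""

-- ===== PRECONDITION & SPEC =====
-- A raises IndexError on the empty list (game[-1]); B raises there too.
def Pre_find_revision (game : List String) : Prop := game ≠ []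
instance (game : List String) : Decidable (Pre_find_revision game) := by unfold Pre_find_revision; infer_instance
def pvWitness_find_revision : List String := (["Foo (Rev 1)", "Foo"])

def Spec_find_revision (game : List String) (out : String) : Prop := out = find_revision_alt game
instance (game : List String) (out : String) : Decidable (Spec_find_revision game out) := by unfold Spec_find_revision; infer_instance

-- ===== CLAIM (what is proved, stated in full; the proofs are below) =====
def Claim_equal_find_revision : Prop := ∀ (game : List String), Dom_find_revision game → Pre_find_revision game → Spec_find_revision game (find_revision game)

-- ===== LEMMAS AND PROOFS =====

lemma findRevScan_eq_head? (l : List String) :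
    findRevScan l = (l.filter (fun rom => PySem.Str.isIn "(Rev" rom)).head? := by
  induction l with
  | nil => rfl
  | cons x t ih =>
      simp only [findRevScan, List.filter_cons]
      by_cases h : PySem.Str.isIn "(Rev" x = true
      · rw [if_pos h, if_pos h]; rfl
      · rw [if_neg h, if_neg h]; exact ih

lemma findRevScan_reverse (l : List String) :
    findRevScan l.reverse = (l.filter (fun rom => PySem.Str.isIn "(Rev" rom)).getLast? := by
  rw [findRevScan_eq_head?, List.filter_reverse, List.head?_reverse]

lemma find_revision_core (g : List String)
    (hpg : g.Pairwise (fun a b : String => a ≤ b)) :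
    (let revisions := g.foldl (fun acc rom =>
        if PySem.Str.isIn "(Rev" rom then acc ++ [rom] else acc) []
     if revisions.length > 0 then
       PySem.List.pyGetD (PySem.List.sorted revisions (fun x => x) false) (-1) ""
     else PySem.List.pyGetD g (-1) "") =
    (match findRevScan g.reverse with
     | some r => r
     | none => PySem.List.pyGetD g (-1) "") := by
  have hrev : g.foldl (fun acc rom =>
      if PySem.Str.isIn "(Rev" rom then acc ++ [rom] else acc) [] =
      g.filter (fun rom => PySem.Str.isIn "(Rev" rom) := by
    simpa using PySem.List.foldl_append_if_eq_filter
      (p := fun rom => PySem.Str.isIn "(Rev" rom) (l := g) (acc := [])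
  simp only [hrev, findRevScan_reverse]
  have hpf : (g.filter (fun rom => PySem.Str.isIn "(Rev" rom)).Pairwise
      (fun a b : String => a ≤ b) := hpg.filter _
  rw [PySem.List.sorted_eq_self_of_pairwise _ (fun x : String => x) hpf]
  cases hf : (g.filter (fun rom => PySem.Str.isIn "(Rev" rom)).getLast? with
  | none =>
      have h0 : g.filter (fun rom => PySem.Str.isIn "(Rev" rom) = [] :=
        List.getLast?_eq_none_iff.mp hf
      rw [h0]; simp
  | some r =>
      have hne' : g.filter (fun rom => PySem.Str.isIn "(Rev" rom) ≠ [] := by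
        intro h; rw [h] at hf; simp at hf
      have hl : 0 < (g.filter (fun rom => PySem.Str.isIn "(Rev" rom)).length :=
        List.length_pos_of_ne_nil hne'
      simp only [hl, if_pos]
      rw [PySem.List.pyGetD_neg_one _ _ hne']
      rw [List.getLast?_eq_some_getLast hne'] at hf
      exact Option.some.inj hf

-- ===== VERDICT (by name: the statement is the Claim_ definition above) =====
theorem find_revision_spec : Claim_equal_find_revision := by
  intro game _ hpre
  have hpg : (PySem.List.sorted game (fun x : String => x) false).Pairwise
      (fun a b : String => a ≤ b) := by
    simpa using PySem.List.sorted_pairwise (xs := game) (key := fun x : String => x)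
  exact find_revision_core _ hpg
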